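-- pv_equiv track=rewrite | github.com/gregoryann/Python-Beginner-Examples | +1500 Python Challenges/Medium/Sum of v0w3ls.py | sum_of_vowels
-- ===== SOURCE A (Python) =====
-- def sum_of_vowels(sentence):
-- 	point = {
--     "A"	:4,
--     "E"	:3,
--     "I"	:1,
--     "O"	:0,
--     "U"	:0
-- 	}
-- 	result = 0
-- 	for n in range(len(sentence)):
-- 		if sentence[n] in ["a", "e", "i", "o", "u", "A", "E", "I", "O", "U"]:
-- 			result += point.get(sentence[n].upper())
-- 	return (result)
-- ===== SOURCE B (Python) =====
-- def sum_of_vowels(sentence):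
--     s = sentence.lower()
--     return 4 * s.count("a") + 3 * s.count("e") + s.count("i")
-- ===== Notes on version B (the rewrite author's own statement) =====
-- stated objective: simpler
-- what changed: Replaces the per-index loop with membership test and dict lookup by lowercasing once and returning a weighted sum of three substring counts (O and U carry weight 0 and are omitted).
import Mathlib
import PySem

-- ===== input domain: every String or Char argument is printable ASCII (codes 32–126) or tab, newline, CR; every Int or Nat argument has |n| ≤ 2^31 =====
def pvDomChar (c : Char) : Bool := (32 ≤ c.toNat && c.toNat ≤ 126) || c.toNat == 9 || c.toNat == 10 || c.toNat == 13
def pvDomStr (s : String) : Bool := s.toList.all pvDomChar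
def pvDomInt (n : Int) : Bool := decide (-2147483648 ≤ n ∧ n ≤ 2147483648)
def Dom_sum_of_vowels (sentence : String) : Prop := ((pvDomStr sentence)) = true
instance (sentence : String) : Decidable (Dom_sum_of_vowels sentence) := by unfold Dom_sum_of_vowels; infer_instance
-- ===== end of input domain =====

-- B lowercases once and returns a weighted sum of three substring counts instead of
-- A's index loop with a membership test and dict lookup per character (objective: simpler).

-- ===== PORT A =====
-- the dict 'point'
def pvPoint : PySem.Dict Char Int :=
  (((((PySem.Dict.empty.insert 'A' 4).insert 'E' 3).insert 'I' 1).insert 'O' 0).insert 'U' 0)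

def sum_of_vowels (sentence : String) : Int :=
  (PySem.List.pyRange 0 (PySem.Str.len sentence) 1).foldl
    (fun result n =>
      -- sentence[n]: n is always in range inside this loop, so the total pyGetD is exact here;
      -- point.get(sentence[n].upper()): the key is always present when the branch runs,
      -- so .get returns the stored value (ported totally with .getD 0)
      if PySem.List.pyGetD sentence.toList n ' '
          ∈ ['a', 'e', 'i', 'o', 'u', 'A', 'E', 'I', 'O', 'U'] then
        result + (pvPoint.get? (PySem.Chars.upperChar (PySem.List.pyGetD sentence.toList n ' '))).getD 0
      else result) 0

-- ===== PORT B =====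
def sum_of_vowels_alt (sentence : String) : Int :=
  4 * (PySem.Str.count (PySem.Str.lower sentence) "a" : Int)
    + 3 * (PySem.Str.count (PySem.Str.lower sentence) "e" : Int)
    + (PySem.Str.count (PySem.Str.lower sentence) "i" : Int)

-- ===== PRECONDITION & SPEC =====
def Spec_sum_of_vowels (sentence : String) (out : Int) : Prop := out = sum_of_vowels_alt sentence
instance (sentence : String) (out : Int) : Decidable (Spec_sum_of_vowels sentence out) := by unfold Spec_sum_of_vowels; infer_instance

-- ===== CLAIM (what is proved, stated in full; the proofs are below) =====
def Claim_equal_sum_of_vowels : Prop := ∀ (sentence : String), Dom_sum_of_vowels sentence → Spec_sum_of_vowels sentence (sum_of_vowels sentence)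

-- ===== LEMMAS AND PROOFS =====

theorem char_eq_of_toNat_eq {a b : Char} (h : a.toNat = b.toNat) : a = b :=
  Char.ext (UInt32.toNat_inj.mp h)

-- count of a single-character substring is the list count of that character
theorem chars_count_go_singleton (c : Char) (l : List Char) (fuel : Nat) (acc : Nat)
    (h : l.length ≤ fuel) :
    PySem.Chars.count.go [c] fuel l acc = acc + l.count c := by
  induction l generalizing fuel acc with
  | nil => cases fuel <;> simp [PySem.Chars.count.go]
  | cons x t ih =>
    cases fuel with
    | zero => simp at h
    | succ fuel =>
      rw [show PySem.Chars.count.go [c] (fuel + 1) (x :: t) acc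
          = if ([c] : List Char).isPrefixOf (x :: t) then
              PySem.Chars.count.go [c] fuel (List.drop 1 (x :: t)) (acc + 1)
            else PySem.Chars.count.go [c] fuel t acc from rfl]
      simp only [List.length_cons] at h
      by_cases hx : c = x
      · subst hx
        rw [if_pos (by simp [List.isPrefixOf])]
        simp only [List.drop_succ_cons, List.drop_zero]
        rw [ih _ _ (by omega)]
        simp
        omega
      · rw [if_neg (by simp [List.isPrefixOf, hx])]
        rw [ih _ _ (by omega)]
        have hxc : ¬ x = c := fun h => hx h.symm
        simp [hxc]

theorem chars_count_singleton (l : List Char) (c : Char) :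
    PySem.Chars.count l [c] = l.count c := by
  simp [PySem.Chars.count, chars_count_go_singleton c l l.length 0 le_rfl]

-- toNat characterisation of lowerChar hitting a lowercase vowel
theorem lowerChar_eq_iff (c : Char) (v : Char) (hv : 97 ≤ v.toNat) (hv' : v.toNat ≤ 122) :
    PySem.Chars.lowerChar c = v ↔ c = v ∨ (PySem.Chars.isupper c ∧ c.toNat + 32 = v.toNat) := by
  unfold PySem.Chars.lowerChar
  split
  · rename_i hup
    simp only [PySem.Chars.isupper, Bool.and_eq_true, decide_eq_true_eq] at hup
    have h1 : (65 : Nat) ≤ c.toNat := hup.1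
    have h2 : c.toNat ≤ 90 := hup.2
    have hval : (Char.ofNat (c.toNat + 32)).toNat = c.toNat + 32 := by
      have hvalid : Nat.isValidChar (c.toNat + 32) := Or.inl (by omega)
      rw [Char.ofNat, dif_pos hvalid]; rfl
    constructor
    · intro hEq
      right
      refine ⟨by simp [PySem.Chars.isupper]; omega, ?_⟩
      rw [← hval, hEq]
    · rintro (rfl | ⟨_, hEq⟩)
      · omega
      · exact char_eq_of_toNat_eq (by rw [hval]; exact hEq)
  · rename_i hup
    constructor
    · intro hEq; exact Or.inl hEq
    · rintro (rfl | ⟨hc, _⟩)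
      · rfl
      · exact absurd hc (by simpa using hup)

-- per-character agreement of A's contribution with B's weights
theorem step_char (c : Char) :
    (if c ∈ ['a', 'e', 'i', 'o', 'u', 'A', 'E', 'I', 'O', 'U'] then
        ((pvPoint.get? (PySem.Chars.upperChar c)).getD 0 : Int)
      else 0)
    = 4 * (if PySem.Chars.lowerChar c = 'a' then (1 : Int) else 0)
      + 3 * (if PySem.Chars.lowerChar c = 'e' then (1 : Int) else 0)
      + (if PySem.Chars.lowerChar c = 'i' then (1 : Int) else 0) := by
  by_cases hm : c ∈ ['a', 'e', 'i', 'o', 'u', 'A', 'E', 'I', 'O', 'U']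
  · simp only [List.mem_cons, List.not_mem_nil, or_false] at hm
    rcases hm with h|h|h|h|h|h|h|h|h|h <;> subst h <;> decide
  · rw [if_neg hm]
    simp only [List.mem_cons, List.not_mem_nil, or_false, not_or] at hm
    have ha : PySem.Chars.lowerChar c ≠ 'a' := by
      rw [ne_eq, lowerChar_eq_iff c 'a' (by decide) (by decide)]
      rintro (rfl | ⟨hup, hEq⟩)
      · exact hm.1 rfl
      · exact hm.2.2.2.2.2.1 (char_eq_of_toNat_eq (show c.toNat = 'A'.toNat by
          have h1 : ('a').toNat = 97 := rfl; have h2 : ('A').toNat = 65 := rfl; omega))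
    have he : PySem.Chars.lowerChar c ≠ 'e' := by
      rw [ne_eq, lowerChar_eq_iff c 'e' (by decide) (by decide)]
      rintro (rfl | ⟨hup, hEq⟩)
      · exact hm.2.1 rfl
      · exact hm.2.2.2.2.2.2.1 (char_eq_of_toNat_eq (show c.toNat = 'E'.toNat by
          have h1 : ('e').toNat = 101 := rfl; have h2 : ('E').toNat = 69 := rfl; omega))
    have hi : PySem.Chars.lowerChar c ≠ 'i' := by
      rw [ne_eq, lowerChar_eq_iff c 'i' (by decide) (by decide)]
      rintro (rfl | ⟨hup, hEq⟩)
      · exact hm.2.2.1 rfl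
      · exact hm.2.2.2.2.2.2.2.1 (char_eq_of_toNat_eq (show c.toNat = 'I'.toNat by
          have h1 : ('i').toNat = 105 := rfl; have h2 : ('I').toNat = 73 := rfl; omega))
    simp [ha, he, hi]

-- A's fold equals B's weighted character counts, on the list side
theorem main_fold (l : List Char) (acc : Int) :
    l.foldl (fun result c =>
      if c ∈ ['a', 'e', 'i', 'o', 'u', 'A', 'E', 'I', 'O', 'U'] then
        result + ((pvPoint.get? (PySem.Chars.upperChar c)).getD 0 : Int)
      else result) acc
    = acc + 4 * (l.countP (fun c => PySem.Chars.lowerChar c == 'a') : Int)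
        + 3 * (l.countP (fun c => PySem.Chars.lowerChar c == 'e') : Int)
        + (l.countP (fun c => PySem.Chars.lowerChar c == 'i') : Int) := by
  induction l generalizing acc with
  | nil => simp
  | cons x t ih =>
    simp only [List.foldl_cons, List.countP_cons]
    rw [ih]
    have hstep := step_char x
    simp only [beq_iff_eq]
    by_cases hm : x ∈ ['a', 'e', 'i', 'o', 'u', 'A', 'E', 'I', 'O', 'U']
    · simp only [if_pos hm] at hstep ⊢
      split_ifs at hstep ⊢ <;> push_cast <;> omega
    · simp only [if_neg hm] at hstep ⊢
      split_ifs at hstep ⊢ <;> push_cast <;> omega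

-- ===== VERDICT (by name: the statement is the Claim_ definition above) =====
theorem sum_of_vowels_spec : Claim_equal_sum_of_vowels := by
  intro s _
  unfold Spec_sum_of_vowels sum_of_vowels sum_of_vowels_alt
  rw [PySem.Str.len_eq, PySem.List.foldl_pyRange_pyGetD' s.toList ' '
    (fun result c =>
      if c ∈ ['a', 'e', 'i', 'o', 'u', 'A', 'E', 'I', 'O', 'U'] then
        result + ((pvPoint.get? (PySem.Chars.upperChar c)).getD 0 : Int)
      else result) 0 (le_refl 0)]
  simp only [Int.toNat_zero, List.drop_zero]
  rw [main_fold]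
  simp only [PySem.Str.count_eq, PySem.Str.toList_lower,
    show ("a" : String).toList = ['a'] from rfl,
    show ("e" : String).toList = ['e'] from rfl,
    show ("i" : String).toList = ['i'] from rfl,
    chars_count_singleton, PySem.Chars.lower]
  simp only [List.count_eq_countP, List.countP_map, Function.comp_def]
  ring
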